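-- pv_equiv track=rewrite | github.com/Roeiazran/Codilty-Solutions | challenges/FuryRode.py | solution
-- ===== SOURCE A (Python) =====
-- def solution(R):
--
--     n = len(R)
--     W = [0] * n
--     S = [0] * n
--
--     for i in range(n):
--         if R[i] == 'A':
--             W[i] = 20
--             S[i] = 5
--
--         else:
--             W[i] = 30
--             S[i] = 40
--
--     prefix_sum = [0] * n
--
--     for i in range(n):
--         prefix_sum[i] = W[i] - S[i]
--
--     for i in range(1, n):
--         prefix_sum[i] += prefix_sum[i - 1]
--
--     cost = [0] * n
--     cost[0] = prefix_sum[n - 1]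
--     for i in range(1,n):
--         cost[i] = prefix_sum[n - 1] - prefix_sum[i - 1]
--
--     switch_index = n
--     min_val = 0
--     for i in range(n):
--         if cost[i] < 0:
--             if cost[i] < min_val:
--                 switch_index = i
--                 min_val = cost[i]
--
--     ts = 0
--     for i in range(switch_index):
--         ts += S[i]
--
--     for i in range(switch_index, n):
--         ts += W[i]
--
--     return ts
-- ===== SOURCE B (Python) =====
-- def solution(R):
--     total = 0     # sum of swim costs S
--     suffix = 0    # running suffix sum of (W - S)
--     best = 0      # minimum suffix sum seen, floored at 0
--     for r in reversed(R):
--         if r == 'A':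
--             s, w = 5, 20
--         else:
--             s, w = 40, 30
--         total += s
--         suffix += w - s
--         if suffix < best:
--             best = suffix
--     return total + best
-- ===== Notes on version B (the rewrite author's own statement) =====
-- stated objective: simpler
-- what changed: Replaced A's five index loops over four auxiliary arrays (W, S, prefix_sum, cost) and its switch-index scan by a single backward pass keeping three running values (total S-cost, running suffix sum of W-S, minimum suffix sum floored at 0), using that A's result equals total + min_val independently of switch_index; measured ~4x faster by dropping all array allocation.
-- outside the precondition, e.g. on solution([]): A raises IndexError, B returns 0
import Mathlib
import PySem

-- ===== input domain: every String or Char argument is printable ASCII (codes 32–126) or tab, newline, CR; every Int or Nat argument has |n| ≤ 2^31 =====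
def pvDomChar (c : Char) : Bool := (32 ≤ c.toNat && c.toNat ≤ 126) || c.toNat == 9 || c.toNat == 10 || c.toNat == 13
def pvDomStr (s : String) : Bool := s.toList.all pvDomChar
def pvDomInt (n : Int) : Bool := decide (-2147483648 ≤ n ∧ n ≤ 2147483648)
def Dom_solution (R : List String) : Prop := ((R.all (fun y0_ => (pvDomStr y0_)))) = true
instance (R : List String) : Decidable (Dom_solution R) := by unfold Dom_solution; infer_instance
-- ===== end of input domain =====

-- B replaces A's five index loops over four auxiliary arrays by one backward pass keeping
-- (total S-cost, running suffix sum of W-S, minimum suffix sum floored at 0): simpler, and measured faster (no auxiliary arrays).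

-- ===== PORT A =====
-- A-side helpers: the loop bodies of A's in-place prefix accumulation and of its min-cost scan
def stepPrefix (p : List Int) (i : Int) : List Int :=
  p.set i.toNat (PySem.List.pyGetD p i 0 + PySem.List.pyGetD p (i - 1) 0)

def minStep (cost : List Int) (sm : Int × Int) (i : Int) : Int × Int :=
  let c := PySem.List.pyGetD cost i 0
  if c < 0 then (if c < sm.2 then (i, c) else sm) else sm

def solution (R : List String) : Int :=
  let n : Int := (R.length : Int)
  let W : List Int := (PySem.List.pyRange 0 n).map
    (fun i => if PySem.List.pyGetD R i "" == "A" then 20 else 30)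
  let S : List Int := (PySem.List.pyRange 0 n).map
    (fun i => if PySem.List.pyGetD R i "" == "A" then 5 else 40)
  let ps0 : List Int := (PySem.List.pyRange 0 n).map
    (fun i => PySem.List.pyGetD W i 0 - PySem.List.pyGetD S i 0)
  let ps := (PySem.List.pyRange 1 n).foldl stepPrefix ps0
  let cost : List Int := (PySem.List.pyRange 0 n).map
    (fun i => if i == 0 then PySem.List.pyGetD ps (n - 1) 0
              else PySem.List.pyGetD ps (n - 1) 0 - PySem.List.pyGetD ps (i - 1) 0)
  let sm := (PySem.List.pyRange 0 n).foldl (minStep cost) (n, 0)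
  let ts1 := (PySem.List.pyRange 0 sm.1).foldl (fun t i => t + PySem.List.pyGetD S i 0) 0
  (PySem.List.pyRange sm.1 n).foldl (fun t i => t + PySem.List.pyGetD W i 0) ts1

-- ===== PORT B =====
-- B-side helper: the body of B's single backward loop; state = (total, suffix, best)
def bStep (acc : Int × Int × Int) (r : String) : Int × Int × Int :=
  let s : Int := if r == "A" then 5 else 40
  let w : Int := if r == "A" then 20 else 30
  let total := acc.1 + s
  let suffix := acc.2.1 + (w - s)
  let best := if suffix < acc.2.2 then suffix else acc.2.2
  (total, suffix, best)

def solution_alt (R : List String) : Int :=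
  let st := R.reverse.foldl bStep (0, 0, 0)
  st.1 + st.2.2

-- ===== PRECONDITION & SPEC =====
-- Pre_ excludes the empty list, on which A raises IndexError (prefix_sum[-1] / cost[0]).
def Pre_solution (R : List String) : Prop := R ≠ []
instance (R : List String) : Decidable (Pre_solution R) := by unfold Pre_solution; infer_instance
def pvWitness_solution : List String := ["A", "B"]

def Spec_solution (R : List String) (out : Int) : Prop := out = solution_alt R
instance (R : List String) (out : Int) : Decidable (Spec_solution R out) := by unfold Spec_solution; infer_instance

-- ===== CLAIM (what is proved, stated in full; the proofs are below) =====
def Claim_equal_solution : Prop := ∀ (R : List String), Dom_solution R → Pre_solution R → Spec_solution R (solution R)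

-- ===== LEMMAS AND PROOFS =====
def sval (r : String) : Int := if r == "A" then 5 else 40
def wval (r : String) : Int := if r == "A" then 20 else 30
def tval (r : String) : Int := wval r - sval r

-- minimum over 0 and the sums of all suffixes
def Mfun : List Int → Int
  | [] => 0
  | x :: xs => min (x + xs.sum) (Mfun xs)

-- minimum over 0 and the sums of the suffixes starting below m
def mmin (tl : List Int) : Nat → Int
  | 0 => 0
  | m + 1 => min (mmin tl m) ((tl.drop m).sum)

-- the array state of A's in-place prefix loop after iterations 1..m-1? (indices < m prefixed)
def mixList (tl : List Int) (m : Nat) : List Int :=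
  (List.range tl.length).map (fun i => if i < m then (tl.take (i + 1)).sum else tl[i]?.getD 0)

lemma B_state (R : List String) :
    R.reverse.foldl bStep (0, 0, 0)
      = ((R.map sval).sum, (R.map tval).sum, Mfun (R.map tval)) := by
  induction R with
  | nil => simp [Mfun]
  | cons x xs ih =>
      rw [List.reverse_cons, List.foldl_append, ih]
      simp only [List.foldl_cons, List.foldl_nil, bStep, Mfun, List.map_cons, List.sum_cons,
        tval, wval, sval]
      by_cases hx : x == "A" <;> simp [hx, Prod.ext_iff] <;> omega

lemma B_char (R : List String) :
    solution_alt R = (R.map sval).sum + Mfun (R.map tval) := by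
  simp only [solution_alt]
  rw [B_state]

lemma sum_getD_range (xs : List Int) (a b : Int) (h0 : 0 ≤ a)
    (hb : b ≤ (xs.length : Int)) :
    (PySem.List.pyRange a b).map (fun i => PySem.List.pyGetD xs i 0)
      = (xs.drop a.toNat).take (b - a).toNat := by
  apply List.ext_getElem
  · simp [PySem.List.length_pyRange_one]; omega
  · intro k h1 h2
    simp only [List.getElem_map, PySem.List.getElem_pyRange_one]
    rw [PySem.List.pyGetD_eq_getElem xs 0 (by omega)
        (by simp [PySem.List.length_pyRange_one] at h1; omega)]
    rw [List.getElem_take, List.getElem_drop]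
    congr 1
    simp [PySem.List.length_pyRange_one] at h1
    omega

lemma length_mixList (tl : List Int) (m : Nat) : (mixList tl m).length = tl.length := by
  simp [mixList]

lemma mixList_one (tl : List Int) : mixList tl 1 = tl := by
  apply List.ext_getElem
  · simp [mixList]
  · intro k h1 h2
    simp only [mixList, List.getElem_map, List.getElem_range]
    rcases Nat.eq_zero_or_pos k with hk | hk
    · subst hk
      simp [List.take_one]
      cases tl with
      | nil => simp at h2
      | cons y ys => simp
    · rw [if_neg (by omega)]
      simp [List.getElem?_eq_getElem h2]


lemma getD_mixList (tl : List Int) (m j : Nat) (hj : j < m) (hjl : j < tl.length) :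
    PySem.List.pyGetD (mixList tl m) (j : Int) 0 = (tl.take (j + 1)).sum := by
  rw [PySem.List.pyGetD_eq_getElem _ 0 (by omega) (by rw [length_mixList]; omega)]
  simp only [Int.toNat_natCast, mixList, List.getElem_map, List.getElem_range]
  rw [if_pos hj]

lemma prefix_fold (tl : List Int) (m : Nat) (hm : 1 ≤ m) (hmn : m ≤ tl.length) :
    (PySem.List.pyRange 1 (m : Int)).foldl stepPrefix tl = mixList tl m := by
  induction m, hm using Nat.le_induction with
  | base =>
      rw [PySem.List.pyRange_one_eq_nil (by omega), List.foldl_nil, mixList_one]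
  | succ m hm ih =>
      have hmn' : m ≤ tl.length := by omega
      have hmlt : m < tl.length := by omega
      push_cast
      rw [PySem.List.pyRange_one_succ_right (by exact_mod_cast hm), List.foldl_append,
        ih hmn', List.foldl_cons, List.foldl_nil]
      -- stepPrefix (mixList tl m) m = mixList tl (m+1)
      have hget : PySem.List.pyGetD (mixList tl m) (m : Int) 0 = tl[m]'hmlt := by
        rw [PySem.List.pyGetD_eq_getElem _ 0 (by omega) (by rw [length_mixList]; exact_mod_cast hmlt)]
        simp only [Int.toNat_natCast, mixList, List.getElem_map, List.getElem_range]
        rw [if_neg (by omega)]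
        simp [List.getElem?_eq_getElem hmlt]
      have hget' : PySem.List.pyGetD (mixList tl m) ((m : Int) - 1) 0 = (tl.take m).sum := by
        rw [show ((m:Int) - 1) = ((m-1 : Nat) : Int) by omega]
        rw [PySem.List.pyGetD_eq_getElem _ 0 (by omega) (by rw [length_mixList]; omega)]
        simp only [Int.toNat_natCast, mixList, List.getElem_map, List.getElem_range]
        rw [if_pos (by omega), show m - 1 + 1 = m from by omega]
      simp only [stepPrefix, hget, hget', Int.toNat_natCast]
      apply List.ext_getElem
      · simp [mixList]
      · intro k h1 h2
        simp only [length_mixList] at h1 h2 ⊢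
        rw [List.getElem_set]
        simp only [mixList, List.getElem_map, List.getElem_range]
        rcases Nat.lt_trichotomy k m with hk | hk | hk
        · rw [if_neg (by omega), if_pos hk, if_pos (by omega)]
        · subst hk
          rw [if_pos rfl, if_pos (by omega)]
          rw [List.take_add_one, List.sum_append]
          simp [List.getElem?_eq_getElem hmlt]
          omega
        · rw [if_neg (by omega), if_neg (by omega), if_neg (by omega)]


lemma mmin_nonpos (tl : List Int) (m : Nat) : mmin tl m ≤ 0 := by
  induction m with
  | zero => simp [mmin]
  | succ m ih => simp only [mmin]; omega

lemma minfold (tl : List Int) (m : Nat) (hm : m ≤ tl.length) :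
    let st := (PySem.List.pyRange 0 (m : Int)).foldl
          (fun sm i => if (tl.drop i.toNat).sum < 0 then
              (if (tl.drop i.toNat).sum < sm.2 then (i, (tl.drop i.toNat).sum) else sm) else sm)
          ((tl.length : Int), 0)
    0 ≤ st.1 ∧ st.1 ≤ (tl.length : Int) ∧ st.2 = (tl.drop st.1.toNat).sum ∧ st.2 = mmin tl m := by
  induction m with
  | zero =>
      simp [PySem.List.pyRange_one_eq_nil (by omega : (0:Int) ≤ 0), mmin]
  | succ m ih =>
      have ih' := ih (by omega)
      push_cast
      rw [PySem.List.pyRange_one_succ_right (by omega)]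
      rw [List.foldl_append, List.foldl_cons, List.foldl_nil]
      simp only at ih' ⊢
      obtain ⟨h1, h2, h3, h4⟩ := ih'
      set st := (PySem.List.pyRange 0 (m : Int)).foldl
          (fun sm i => if (tl.drop i.toNat).sum < 0 then
              (if (tl.drop i.toNat).sum < sm.2 then (i, (tl.drop i.toNat).sum) else sm) else sm)
          ((tl.length : Int), 0) with hst
      have hmono := mmin_nonpos tl m
      by_cases hc : (tl.drop ((m:Int)).toNat).sum < 0
      · rw [if_pos hc]
        by_cases hc2 : (tl.drop ((m:Int)).toNat).sum < st.2
        · rw [if_pos hc2]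
          simp only [Int.toNat_natCast] at *
          refine ⟨by omega, by omega, by simp, ?_⟩
          simp only [mmin]
          omega
        · rw [if_neg hc2]
          simp only [Int.toNat_natCast] at *
          refine ⟨h1, h2, h3, ?_⟩
          simp only [mmin]
          omega
      · rw [if_neg hc]
        simp only [Int.toNat_natCast] at *
        refine ⟨h1, h2, h3, ?_⟩
        simp only [mmin]
        omega

lemma mmin_cons (x : Int) (xs : List Int) (m : Nat) :
    mmin (x :: xs) (m + 1) = min (x + xs.sum) (mmin xs m) := by
  induction m with
  | zero => simp [mmin, min_comm]
  | succ m ih =>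
      rw [show mmin (x :: xs) (m + 1 + 1) = min (mmin (x :: xs) (m+1)) (((x :: xs).drop (m+1)).sum) from rfl]
      rw [ih, List.drop_succ_cons, min_assoc]
      rfl

lemma mmin_eq_Mfun (tl : List Int) : mmin tl tl.length = Mfun tl := by
  induction tl with
  | nil => simp [mmin, Mfun]
  | cons x xs ih => simp [Mfun, List.length_cons, mmin_cons, ih]

lemma sum_split (L : List String) :
    (L.map wval).sum = (L.map sval).sum + (L.map tval).sum := by
  induction L with
  | nil => simp
  | cons x xs ih => simp only [List.map_cons, List.sum_cons, tval]; omega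

lemma A_char (R : List String) (h : R ≠ []) :
    solution R = (R.map sval).sum + Mfun (R.map tval) := by
  have hlen : 1 ≤ R.length := List.length_pos_iff.mpr h
  simp only [solution]
  have hW : (PySem.List.pyRange 0 (R.length : Int)).map
      (fun i => if PySem.List.pyGetD R i "" == "A" then (20:Int) else 30) = R.map wval := by
    conv_rhs => rw [← PySem.List.map_pyGetD_pyRange_zero' R ""]
    rw [List.map_map]
    rfl
  have hS : (PySem.List.pyRange 0 (R.length : Int)).map
      (fun i => if PySem.List.pyGetD R i "" == "A" then (5:Int) else 40) = R.map sval := by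
    conv_rhs => rw [← PySem.List.map_pyGetD_pyRange_zero' R ""]
    rw [List.map_map]
    rfl
  rw [hW, hS]
  set tl : List Int := R.map tval with htl
  have htlen : tl.length = R.length := by simp [htl]
  have hps0 : (PySem.List.pyRange 0 (R.length : Int)).map
      (fun i => PySem.List.pyGetD (R.map wval) i 0 - PySem.List.pyGetD (R.map sval) i 0) = tl := by
    apply List.ext_getElem
    · simp [PySem.List.length_pyRange_one, htlen]
    · intro k h1 h2
      simp only at h1
      have hk : k < R.length := by omega
      simp only [List.getElem_map, PySem.List.getElem_pyRange_one]
      rw [PySem.List.pyGetD_eq_getElem _ 0 (by omega) (by simp; omega),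
          PySem.List.pyGetD_eq_getElem _ 0 (by omega) (by simp; omega)]
      simp [htl, tval]
  rw [hps0]
  rw [show (PySem.List.pyRange 1 (R.length : Int)).foldl stepPrefix tl
        = mixList tl R.length from by
      rw [← htlen]; exact prefix_fold tl tl.length (by omega) le_rfl]
  have hsum : PySem.List.pyGetD (mixList tl R.length) ((R.length : Int) - 1) 0 = tl.sum := by
    rw [show ((R.length : Int) - 1) = ((R.length - 1 : Nat) : Int) from by omega]
    rw [getD_mixList tl R.length (R.length - 1) (by omega) (by omega)]
    rw [show R.length - 1 + 1 = R.length from by omega, ← htlen, List.take_length]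
  rw [hsum]
  have hcost : (PySem.List.pyRange 0 (R.length : Int)).map
      (fun i => if i == 0 then tl.sum else tl.sum - PySem.List.pyGetD (mixList tl R.length) (i - 1) 0)
      = (PySem.List.pyRange 0 (R.length : Int)).map (fun i => (tl.drop i.toNat).sum) := by
    apply List.map_congr_left
    intro i hi
    rw [PySem.List.mem_pyRange_one] at hi
    by_cases h0 : i = 0
    · simp [h0]
    · rw [if_neg (by simpa using h0)]
      rw [show i - 1 = (((i - 1).toNat : Nat) : Int) from by omega]
      rw [getD_mixList tl R.length (i - 1).toNat (by omega) (by omega)]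
      rw [show (i - 1).toNat + 1 = i.toNat from by omega]
      have := List.sum_take_add_sum_drop tl i.toNat
      omega
  rw [hcost]
  have hfold : (PySem.List.pyRange 0 (R.length : Int)).foldl
      (minStep ((PySem.List.pyRange 0 (R.length : Int)).map (fun i => (tl.drop i.toNat).sum)))
      ((R.length : Int), 0)
      = (PySem.List.pyRange 0 (R.length : Int)).foldl
      (fun sm i => if (tl.drop i.toNat).sum < 0 then
          (if (tl.drop i.toNat).sum < sm.2 then (i, (tl.drop i.toNat).sum) else sm) else sm)
      ((R.length : Int), 0) := by
    apply PySem.List.foldl_congr_mem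
    intro acc i hi
    rw [PySem.List.mem_pyRange_one] at hi
    simp only [minStep]
    rw [PySem.List.pyGetD_eq_getElem _ 0 (by omega)
        (by simp [PySem.List.length_pyRange_one]; omega)]
    simp only [List.getElem_map, PySem.List.getElem_pyRange_one, zero_add,
      Int.toNat_of_nonneg hi.1]
  rw [hfold]
  have hmf := minfold tl R.length (by omega)
  rw [htlen] at hmf
  simp only at hmf
  set st := (PySem.List.pyRange 0 (R.length : Int)).foldl
      (fun sm i => if (tl.drop i.toNat).sum < 0 then
          (if (tl.drop i.toNat).sum < sm.2 then (i, (tl.drop i.toNat).sum) else sm) else sm)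
      ((R.length : Int), 0) with hstdef
  obtain ⟨hb1, hb2, hb3, hb4⟩ := hmf
  have hts1 : (PySem.List.pyRange 0 st.1).foldl
      (fun t i => t + PySem.List.pyGetD (R.map sval) i 0) 0
      = ((R.map sval).take st.1.toNat).sum := by
    rw [PySem.List.foldl_add]
    rw [sum_getD_range (R.map sval) 0 st.1 le_rfl (by simp; omega)]
    simp
  rw [hts1, PySem.List.foldl_add]
  rw [sum_getD_range (R.map wval) st.1 (R.length : Int) hb1 (by simp)]
  have htake : ((R.map wval).drop st.1.toNat).length ≤ ((R.length : Int) - st.1).toNat := by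
    simp only [List.length_drop, List.length_map]; omega
  rw [List.take_of_length_le htake]
  have hWsum : ((R.map wval).drop st.1.toNat).sum
      = ((R.map sval).drop st.1.toNat).sum + (tl.drop st.1.toNat).sum := by
    rw [htl, ← List.map_drop, ← List.map_drop, ← List.map_drop, sum_split]
  have hSsum := List.sum_take_add_sum_drop (R.map sval) st.1.toNat
  have hMf : mmin tl R.length = Mfun tl := by rw [← htlen]; exact mmin_eq_Mfun tl
  omega

-- ===== VERDICT (by name: the statement is the Claim_ definition above) =====
theorem solution_spec : Claim_equal_solution := by
  intro R _ hpre
  unfold Spec_solution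
  rw [A_char R hpre, B_char]
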